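-- pv_equiv track=rewrite | github.com/Sif-2/ViTInMinecraft | KmeanTransformer.py | numToBez
-- ===== SOURCE A (Python) =====
-- def numToBez(beznum, numlettertouse2, numCluster):
--
--     for x in (["q", "k", "v"][:numlettertouse2]):
--         for y in range(6):
--             for z in range(numCluster):
--                 x2 = 0
--                 if (x == "k"):
--                     x2 = 1
--                 if (x == "v"):
--                     x2 = 2
--                 tempvalue = z + (y * 5) + (x2 * 30)
--                 if (tempvalue == beznum):
--                     stringtoprint = x + "head" + str(y) + "cluster" + str(z)
--                     bezvalues = [x2, y, z]
--
--                     return stringtoprint, bezvalues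
-- ===== SOURCE B (Python) =====
-- def numToBez(beznum, numlettertouse2, numCluster):
--     # For each usable letter, solve z + 5*y + 30*x2 == beznum directly:
--     # take the smallest y in [0, 5] whose z = beznum - 30*x2 - 5*y lies in [0, numCluster).
--     for x2, x in enumerate(["q", "k", "v"][:numlettertouse2]):
--         r = beznum - 30 * x2
--         if r < 0 or numCluster <= 0:
--             continue
--         y = max(0, -((numCluster - 1 - r) // 5))  # smallest y with r - 5*y < numCluster
--         if y <= min(5, r // 5):
--             z = r - 5 * y
--             return x + "head" + str(y) + "cluster" + str(z), [x2, y, z]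
-- ===== Notes on version B (the rewrite author's own statement) =====
-- stated objective: faster
-- what changed: Replaces A's triple nested scan over all (letter, head, cluster) combinations by a single pass over the at-most-3 usable letters that inverts the encoding z + 5*y + 30*x2 arithmetically in O(1) per letter.
import Mathlib
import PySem

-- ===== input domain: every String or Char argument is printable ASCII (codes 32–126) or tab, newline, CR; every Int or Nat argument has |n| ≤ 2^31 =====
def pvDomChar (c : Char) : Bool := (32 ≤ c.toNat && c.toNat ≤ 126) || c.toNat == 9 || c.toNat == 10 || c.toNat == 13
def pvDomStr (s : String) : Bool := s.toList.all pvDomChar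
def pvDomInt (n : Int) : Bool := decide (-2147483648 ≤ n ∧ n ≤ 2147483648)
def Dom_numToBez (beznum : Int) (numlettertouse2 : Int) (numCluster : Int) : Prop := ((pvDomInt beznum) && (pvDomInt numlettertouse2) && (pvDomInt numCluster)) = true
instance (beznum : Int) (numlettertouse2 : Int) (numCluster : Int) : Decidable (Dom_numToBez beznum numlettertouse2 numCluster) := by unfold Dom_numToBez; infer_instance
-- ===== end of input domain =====

-- B replaces A's triple nested scan by one pass over the ≤ 3 usable letters with an O(1)
-- arithmetic inversion of tempvalue = z + 5*y + 30*x2 per letter; objective: faster.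

-- ===== PORT A =====
-- inner 'for z in range(numCluster)' loop with early return
def aZLoop (x : String) (beznum : Int) (y : Int) (zs : List Int) : Option (String × List Int) :=
  match zs with
  | [] => none
  | z :: rest =>
    let x2 : Int := 0
    let x2 : Int := if x == "k" then 1 else x2
    let x2 : Int := if x == "v" then 2 else x2
    let tempvalue := z + (y * 5) + (x2 * 30)
    if tempvalue == beznum then
      some (x ++ "head" ++ PySem.Int.toStr y ++ "cluster" ++ PySem.Int.toStr z, [x2, y, z])
    else aZLoop x beznum y rest

-- 'for y in range(6)'
def aYLoop (x : String) (beznum : Int) (numCluster : Int) (ys : List Int) : Option (String × List Int) :=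
  match ys with
  | [] => none
  | y :: rest =>
    match aZLoop x beznum y (PySem.List.pyRange 0 numCluster 1) with
    | some r => some r
    | none => aYLoop x beznum numCluster rest

-- 'for x in ["q", "k", "v"][:numlettertouse2]'
def aXLoop (beznum : Int) (numCluster : Int) (xs : List String) : Option (String × List Int) :=
  match xs with
  | [] => none
  | x :: rest =>
    match aYLoop x beznum numCluster (PySem.List.pyRange 0 6 1) with
    | some r => some r
    | none => aXLoop beznum numCluster rest

def numToBez (beznum : Int) (numlettertouse2 : Int) (numCluster : Int) : Option (String × List Int) :=
  aXLoop beznum numCluster (PySem.List.slice ["q", "k", "v"] none (some numlettertouse2))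

-- ===== PORT B =====
-- B's loop body for one letter (x2, x): O(1) inversion of z + 5*y + 30*x2 = beznum
def bBody (beznum : Int) (numCluster : Int) (x2 : Int) (x : String) : Option (String × List Int) :=
  let r := beznum - 30 * x2
  if r < 0 ∨ numCluster ≤ 0 then none
  else
    let y := max 0 (-(PySem.Int.floordiv (numCluster - 1 - r) 5))
    if y ≤ min 5 (PySem.Int.floordiv r 5) then
      let z := r - 5 * y
      some (x ++ "head" ++ PySem.Int.toStr y ++ "cluster" ++ PySem.Int.toStr z, [x2, y, z])
    else none

-- 'for x2, x in enumerate(...)' with early return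
def bLoop (beznum : Int) (numCluster : Int) (xs : List (Int × String)) : Option (String × List Int) :=
  match xs with
  | [] => none
  | (x2, x) :: rest =>
    match bBody beznum numCluster x2 x with
    | some r => some r
    | none => bLoop beznum numCluster rest

def numToBez_alt (beznum : Int) (numlettertouse2 : Int) (numCluster : Int) : Option (String × List Int) :=
  bLoop beznum numCluster
    (PySem.List.enumerate (PySem.List.slice ["q", "k", "v"] none (some numlettertouse2)))

-- ===== PRECONDITION & SPEC =====
def Spec_numToBez (beznum : Int) (numlettertouse2 : Int) (numCluster : Int) (out : Option (String × List Int)) : Prop := out = numToBez_alt beznum numlettertouse2 numCluster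
instance (beznum : Int) (numlettertouse2 : Int) (numCluster : Int) (out : Option (String × List Int)) : Decidable (Spec_numToBez beznum numlettertouse2 numCluster out) := by unfold Spec_numToBez; infer_instance

-- ===== CLAIM (what is proved, stated in full; the proofs are below) =====
def Claim_equal_numToBez : Prop := ∀ (beznum : Int) (numlettertouse2 : Int) (numCluster : Int), Dom_numToBez beznum numlettertouse2 numCluster → Spec_numToBez beznum numlettertouse2 numCluster (numToBez beznum numlettertouse2 numCluster)

-- ===== LEMMAS AND PROOFS =====

-- A's z-scan returns exactly t := beznum - 5*y - 30*x2 (the only matching z), if present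
theorem aZLoop_eq (x : String) (x2 : Int) (beznum y : Int) (zs : List Int)
    (hx2 : (if x == "v" then (2:Int) else if x == "k" then 1 else 0) = x2) :
    aZLoop x beznum y zs =
      (if beznum - y * 5 - x2 * 30 ∈ zs then
         some (x ++ "head" ++ PySem.Int.toStr y ++ "cluster"
                 ++ PySem.Int.toStr (beznum - y * 5 - x2 * 30), [x2, y, beznum - y * 5 - x2 * 30])
       else none) := by
  induction zs with
  | nil => simp [aZLoop]
  | cons z rest ih =>
    show (if (z + (y * 5) + (if x == "v" then (2:Int) else if x == "k" then 1 else 0) * 30 == beznum) = true then _ else aZLoop x beznum y rest) = _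
    rw [hx2, ih]
    simp only [List.mem_cons, beq_iff_eq]
    by_cases hz : z + y * 5 + x2 * 30 = beznum
    · simp [hz, show beznum - y * 5 - x2 * 30 = z from by omega]
    · simp [show ¬(z + y * 5 + x2 * 30 = beznum) from hz,
            show ¬(beznum - y * 5 - x2 * 30 = z) from by omega]

-- shared shape of both programs' success value
def pvMk (x : String) (x2 y t : Int) : Option (String × List Int) :=
  some (x ++ "head" ++ PySem.Int.toStr y ++ "cluster" ++ PySem.Int.toStr t, [x2, y, t])

theorem pvMk_congr (x : String) (x2 : Int) {y1 y2 t1 t2 : Int} (hy : y1 = y2) (ht : t1 = t2) :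
    pvMk x x2 y1 t1 = pvMk x x2 y2 t2 := by rw [hy, ht]

-- for one letter, A's y/z double scan equals B's O(1) inversion
theorem yloop_eq (x : String) (x2 : Int) (beznum C : Int)
    (hx2 : (if x == "v" then (2:Int) else if x == "k" then 1 else 0) = x2) :
    aYLoop x beznum C (PySem.List.pyRange 0 6 1) = bBody beznum C x2 x := by
  have h5 : (0 : Int) < 5 := by norm_num
  have ystep : ∀ (y : Int) (ys : List Int),
      aYLoop x beznum C (y :: ys) =
        if 0 ≤ beznum - y * 5 - x2 * 30 ∧ beznum - y * 5 - x2 * 30 < C then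
          pvMk x x2 y (beznum - y * 5 - x2 * 30)
        else aYLoop x beznum C ys := by
    intro y ys
    show (match aZLoop x beznum y (PySem.List.pyRange 0 C 1) with
          | some r => some r | none => aYLoop x beznum C ys) = _
    rw [aZLoop_eq x x2 beznum y _ hx2]
    simp only [PySem.List.mem_pyRange_one]
    split_ifs <;> rfl
  have hnil : aYLoop x beznum C [] = none := rfl
  have hr6 : PySem.List.pyRange 0 6 1 = [0, 1, 2, 3, 4, 5] := by decide
  rw [hr6, ystep, ystep, ystep, ystep, ystep, ystep, hnil]
  simp only [bBody]
  have h1 := PySem.Int.floordiv_mul_add_mod (C - 1 - (beznum - 30 * x2)) 5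
  have h2 := PySem.Int.mod_nonneg (C - 1 - (beznum - 30 * x2)) h5
  have h3 := PySem.Int.mod_lt (C - 1 - (beznum - 30 * x2)) h5
  have h4 := PySem.Int.floordiv_mul_add_mod (beznum - 30 * x2) 5
  have h6 := PySem.Int.mod_nonneg (beznum - 30 * x2) h5
  have h7 := PySem.Int.mod_lt (beznum - 30 * x2) h5
  set d := PySem.Int.floordiv (C - 1 - (beznum - 30 * x2)) 5 with hd
  set q := PySem.Int.floordiv (beznum - 30 * x2) 5 with hq
  set m1 := PySem.Int.mod (C - 1 - (beznum - 30 * x2)) 5 with hm1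
  set m2 := PySem.Int.mod (beznum - 30 * x2) 5 with hm2
  have hL : max 0 (-d) = 0 ∨ max 0 (-d) = -d := max_choice 0 (-d)
  have hL1 : (0:Int) ≤ max 0 (-d) := le_max_left _ _
  have hL2 : -d ≤ max 0 (-d) := le_max_right _ _
  have hM : min 5 q = 5 ∨ min 5 q = q := min_choice 5 q
  have hM1 : min 5 q ≤ 5 := min_le_left _ _
  have hM2 : min 5 q ≤ q := min_le_right _ _
  set L := max 0 (-d)
  set M := min 5 q
  show _ = if _ then none else if L ≤ M then pvMk x x2 L (beznum - 30 * x2 - 5 * L) else none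
  split_ifs <;> first
    | rfl
    | omega
    | exact pvMk_congr x x2 (by omega) (by omega)

-- ===== VERDICT (by name: the statement is the Claim_ definition above) =====
theorem numToBez_spec : Claim_equal_numToBez := by
  intro beznum nl nc _
  unfold Spec_numToBez
  have e0 := yloop_eq "q" 0 beznum nc (by decide)
  have e1 := yloop_eq "k" 1 beznum nc (by decide)
  have e2 := yloop_eq "v" 2 beznum nc (by decide)
  simp only [numToBez, numToBez_alt]
  have hslice : PySem.List.slice ["q", "k", "v"] none (some nl)
      = List.take (PySem.List.clampIdx 3 nl) ["q", "k", "v"] := by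
    simp [PySem.List.slice]
  rw [hslice]
  have hn4 : PySem.List.clampIdx 3 nl = 0 ∨ PySem.List.clampIdx 3 nl = 1
      ∨ PySem.List.clampIdx 3 nl = 2 ∨ PySem.List.clampIdx 3 nl = 3 := by
    simp only [PySem.List.clampIdx]; split_ifs <;> omega
  rcases hn4 with h | h | h | h <;> rw [h]
  · simp only [aXLoop, bLoop, List.take, PySem.List.enumerate]
  · simp only [show List.take 1 ["q", "k", "v"] = ["q"] from rfl,
      show PySem.List.enumerate ["q"] = [(0, "q")] from by decide,
      aXLoop, bLoop, e0]
  · simp only [show List.take 2 ["q", "k", "v"] = ["q", "k"] from rfl,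
      show PySem.List.enumerate ["q", "k"] = [(0, "q"), (1, "k")] from by decide,
      aXLoop, bLoop, e0, e1]
  · simp only [show List.take 3 ["q", "k", "v"] = ["q", "k", "v"] from rfl,
      show PySem.List.enumerate ["q", "k", "v"] = [(0, "q"), (1, "k"), (2, "v")] from by decide,
      aXLoop, bLoop, e0, e1, e2]
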